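-- pv_equiv track=rewrite | github.com/Ramon-UFSJ2023/ExPraticoIA | facil.py | gerar_solucao_inicial_spt
-- ===== SOURCE A (Python) =====
-- def gerar_solucao_inicial_spt(tarefas_tempos, num_maquinas):
--     """
--     Gera uma solução inicial usando a heurística SPT (Shortest Processing Time).
--     Ordena as tarefas da mais rápida para a mais demorada.
--     """
--     # Ordena as tarefas por tempo, da MENOR para a MAIOR
--     # A única mudança foi remover o 'reverse=True'
--     tarefas_ordenadas = sorted(tarefas_tempos.items(), key=lambda item: item[1]) # <-- ALTERADO
--
--     solucao = [[] for _ in range(num_maquinas)]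
--     tempos_maquinas = [0] * num_maquinas
--     for tarefa_id, tempo in tarefas_ordenadas:
--         # Encontra a máquina com a menor carga atual
--         idx_maquina_livre = min(range(num_maquinas), key=lambda i: tempos_maquinas[i])
--
--         # Atribui a tarefa a essa máquina
--         solucao[idx_maquina_livre].append(tarefa_id)
--         tempos_maquinas[idx_maquina_livre] += tempo
--
--     return solucao
-- ===== SOURCE B (Python) =====
-- def gerar_solucao_inicial_spt(tarefas_tempos, num_maquinas):
--     """SPT list scheduling: instead of re-scanning all machine loads for each
--     task, keep the machines in a list sorted by (carga, indice): the least
--     loaded machine is always at the front, and after assigning a task the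
--     machine is re-inserted at its ordered position."""
--     ordenadas = sorted(tarefas_tempos.items(), key=lambda item: item[1])
--     solucao = [[] for _ in range(num_maquinas)]
--     # machine pool, kept sorted by (carga, indice)
--     maquinas = [(0, i) for i in range(num_maquinas)]
--     for tarefa_id, tempo in ordenadas:
--         carga, idx = maquinas.pop(0)          # least-loaded machine
--         solucao[idx].append(tarefa_id)
--         nova = (carga + tempo, idx)
--         pos = 0
--         while pos < len(maquinas) and maquinas[pos] <= nova:
--             pos += 1
--         maquinas.insert(pos, nova)            # keep the pool sorted
--     return solucao
-- ===== Notes on version B (the rewrite author's own statement) =====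
-- stated objective: alternative
-- what changed: B replaces A's per-task full min-scan of the machine-load array with a machine pool kept as a list sorted by (load, index): the least-loaded machine is popped from the front and re-inserted at its ordered position after each assignment.
import Mathlib
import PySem

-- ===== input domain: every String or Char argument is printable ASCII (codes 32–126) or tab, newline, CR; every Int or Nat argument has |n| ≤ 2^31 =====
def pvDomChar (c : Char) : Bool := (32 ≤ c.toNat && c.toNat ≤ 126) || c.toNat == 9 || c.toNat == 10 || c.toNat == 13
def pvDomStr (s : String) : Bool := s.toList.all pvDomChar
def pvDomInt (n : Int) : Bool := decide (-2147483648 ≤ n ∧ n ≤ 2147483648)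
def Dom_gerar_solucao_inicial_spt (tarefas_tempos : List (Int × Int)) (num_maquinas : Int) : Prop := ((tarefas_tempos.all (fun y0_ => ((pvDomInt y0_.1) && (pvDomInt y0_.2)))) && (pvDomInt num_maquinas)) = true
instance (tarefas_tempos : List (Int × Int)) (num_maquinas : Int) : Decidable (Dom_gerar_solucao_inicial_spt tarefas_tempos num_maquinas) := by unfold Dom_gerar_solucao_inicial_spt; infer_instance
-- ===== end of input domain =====

-- B keeps the machine pool as a list sorted by (load, index) — pop the front, re-insert in order — instead of A's full min-scan of the load array per task; objective: alternative.

-- ===== PORT A =====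
def gerar_solucao_inicial_spt (tarefas_tempos : List (Int × Int)) (num_maquinas : Int) : List (List Int) :=
  let ordenadas := PySem.List.sorted (PySem.Dict.ofList tarefas_tempos).items (fun item => item.2)
  let solucao : List (List Int) := (PySem.List.pyRange 0 num_maquinas 1).map (fun _ => [])
  let tempos : List Int := List.replicate num_maquinas.toNat 0
  (ordenadas.foldl (fun st tv =>
      -- min(range(num_maquinas), key=lambda i: tempos_maquinas[i]); the .getD 0 is
      -- reached only when the range is empty, where Python raises (excluded by Pre_)
      let idx : Int := (PySem.List.min? (PySem.List.pyRange 0 num_maquinas 1)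
                          (fun i => PySem.List.pyGetD st.2 i 0)).getD 0
      (st.1.set idx.toNat (st.1.getD idx.toNat [] ++ [tv.1]),
       st.2.set idx.toNat (st.2.getD idx.toNat 0 + tv.2))) (solucao, tempos)).1

-- ===== PORT B =====
-- helper: the while/insert loop of Source B — ordered insertion by Python's tuple ≤
def pvLexLe (q p : Int × Int) : Bool := q.1 < p.1 || (q.1 == p.1 && q.2 ≤ p.2)

def pvInsLex (p : Int × Int) : List (Int × Int) → List (Int × Int)
  | [] => [p]
  | q :: qs => if pvLexLe q p then q :: pvInsLex p qs else p :: q :: qs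

def gerar_solucao_inicial_spt_alt (tarefas_tempos : List (Int × Int)) (num_maquinas : Int) : List (List Int) :=
  let ordenadas := PySem.List.sorted (PySem.Dict.ofList tarefas_tempos).items (fun item => item.2)
  let solucao : List (List Int) := (PySem.List.pyRange 0 num_maquinas 1).map (fun _ => [])
  let maquinas : List (Int × Int) := (PySem.List.pyRange 0 num_maquinas 1).map (fun i => (0, i))
  (ordenadas.foldl (fun st tv =>
      match st.2 with
      | [] => st   -- maquinas.pop(0) raises IndexError here in Python (excluded by Pre_)
      | (carga, idx) :: rest =>
          (st.1.set idx.toNat (st.1.getD idx.toNat [] ++ [tv.1]),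
           pvInsLex (carga + tv.2, idx) rest)) (solucao, maquinas)).1

-- ===== PRECONDITION & SPEC =====
-- Pre_ excludes only the inputs where both Pythons raise: num_maquinas < 1 with a
-- nonempty task dict (A: ValueError from min() on an empty range; B: IndexError from pop).
def Pre_gerar_solucao_inicial_spt (tarefas_tempos : List (Int × Int)) (num_maquinas : Int) : Prop :=
  1 ≤ num_maquinas ∨ tarefas_tempos = []
instance (tarefas_tempos : List (Int × Int)) (num_maquinas : Int) : Decidable (Pre_gerar_solucao_inicial_spt tarefas_tempos num_maquinas) := by unfold Pre_gerar_solucao_inicial_spt; infer_instance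
def pvWitness_gerar_solucao_inicial_spt : (List (Int × Int)) × Int := ([(1, 3), (2, 1), (3, 2)], 2)

def Spec_gerar_solucao_inicial_spt (tarefas_tempos : List (Int × Int)) (num_maquinas : Int) (out : List (List Int)) : Prop := out = gerar_solucao_inicial_spt_alt tarefas_tempos num_maquinas
instance (tarefas_tempos : List (Int × Int)) (num_maquinas : Int) (out : List (List Int)) : Decidable (Spec_gerar_solucao_inicial_spt tarefas_tempos num_maquinas out) := by unfold Spec_gerar_solucao_inicial_spt; infer_instance

-- ===== CLAIM (what is proved, stated in full; the proofs are below) =====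
def Claim_equal_gerar_solucao_inicial_spt : Prop := ∀ (tarefas_tempos : List (Int × Int)) (num_maquinas : Int), Dom_gerar_solucao_inicial_spt tarefas_tempos num_maquinas → Pre_gerar_solucao_inicial_spt tarefas_tempos num_maquinas → Spec_gerar_solucao_inicial_spt tarefas_tempos num_maquinas (gerar_solucao_inicial_spt tarefas_tempos num_maquinas)

-- ===== LEMMAS AND PROOFS =====

-- strict lexicographic order on (load, index) pairs
def pvLexLt (p q : Int × Int) : Prop := p.1 < q.1 ∨ (p.1 = q.1 ∧ p.2 < q.2)

-- the machine pool described by a load array, indices starting at off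
def pvMach : List Int → Int → List (Int × Int)
  | [], _ => []
  | x :: l, off => (x, off) :: pvMach l (off + 1)

theorem pvMach_length (l : List Int) (off : Int) : (pvMach l off).length = l.length := by
  induction l generalizing off with
  | nil => rfl
  | cons x l ih => simp [pvMach, ih]

theorem mem_pvMach (l : List Int) (off : Int) (r : Int × Int) :
    r ∈ pvMach l off ↔ ∃ (k : Nat) (h : k < l.length), r = (l[k], off + k) := by
  induction l generalizing off with
  | nil => simp [pvMach]
  | cons x l ih =>
      simp only [pvMach, List.mem_cons, ih]
      constructor
      · rintro (rfl | ⟨k, hk, rfl⟩)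
        · exact ⟨0, by simp, by simp⟩
        · exact ⟨k + 1, by simpa using hk, by simp; ring⟩
      · rintro ⟨k, hk, rfl⟩
        cases k with
        | zero => left; simp
        | succ k => right; exact ⟨k, by simpa using hk, by simp; ring⟩

theorem pvMach_set_perm (l : List Int) (k : Nat) (v : Int) (off : Int) (h : k < l.length) :
    (pvMach (l.set k v) off).Perm ((v, off + k) :: (pvMach l off).erase (l[k], off + k)) := by
  induction l generalizing k off with
  | nil => simp at h
  | cons x l ih =>
      cases k with
      | zero =>
          simp [pvMach, List.set]
      | succ k =>
          have hk : k < l.length := by simpa using h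
          have hgl : (x :: l)[k+1] = l[k] := by simp
          have hne : ¬ ((x, off) = ((l[k], off + (k+1)) : Int × Int)) := by
            intro hc
            have := congrArg Prod.snd hc
            simp at this; omega
          simp only [List.set, pvMach, hgl]
          rw [List.erase_cons_tail (by simpa using hne)]
          have heq : (off + ((k:Int)+1) : Int) = (off + 1) + k := by ring
          have hperm := ih k (off + 1) hk
          push_cast
          rw [heq]
          exact (hperm.cons (x, off)).trans (List.Perm.swap _ _ _)

theorem pvInsLex_perm (p : Int × Int) (l : List (Int × Int)) : (pvInsLex p l).Perm (p :: l) := by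
  induction l with
  | nil => rfl
  | cons q qs ih =>
      simp only [pvInsLex]
      split
      · exact ((ih.cons q).trans (List.Perm.swap _ _ _))
      · rfl

theorem mem_pvInsLex (p r : Int × Int) (l : List (Int × Int)) :
    r ∈ pvInsLex p l ↔ r = p ∨ r ∈ l := by
  have := (pvInsLex_perm p l).mem_iff (a := r)
  simpa using this

theorem pvLexLt_trans {p q r : Int × Int} (h1 : pvLexLt p q) (h2 : pvLexLt q r) : pvLexLt p r := by
  unfold pvLexLt at *; rcases h1 with h1 | ⟨h1, h1'⟩ <;> rcases h2 with h2 | ⟨h2, h2'⟩ <;>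
    first | (left; omega) | (right; constructor <;> omega)

theorem pvLexLe_of_not (q p : Int × Int) (h : pvLexLe q p = false) : pvLexLt p q := by
  unfold pvLexLe at h
  unfold pvLexLt
  simp only [Bool.or_eq_false_iff, Bool.and_eq_false_iff, decide_eq_false_iff_not, beq_eq_false_iff_ne] at h
  rcases h with ⟨h1, h2⟩
  rcases h2 with h2 | h2
  · left; omega
  · by_cases hq : q.1 = p.1
    · right; exact ⟨hq.symm, by omega⟩
    · left; omega

theorem pvLexLt_of_le_ne (q p : Int × Int) (h : pvLexLe q p = true) (hne : q.2 ≠ p.2) : pvLexLt q p := by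
  unfold pvLexLe at h
  unfold pvLexLt
  simp only [Bool.or_eq_true, Bool.and_eq_true, decide_eq_true_eq, beq_iff_eq] at h
  rcases h with h | ⟨h1, h2⟩
  · left; exact h
  · right; exact ⟨h1, lt_of_le_of_ne h2 hne⟩

theorem pvInsLex_pairwise (p : Int × Int) (l : List (Int × Int))
    (hl : l.Pairwise pvLexLt) (hne : ∀ q ∈ l, q.2 ≠ p.2) :
    (pvInsLex p l).Pairwise pvLexLt := by
  induction l with
  | nil => simp [pvInsLex]
  | cons q qs ih =>
      rcases List.pairwise_cons.mp hl with ⟨hq, hqs⟩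
      simp only [pvInsLex]
      split
      · rename_i hle
        refine List.pairwise_cons.mpr ⟨?_, ih hqs (fun r hr => hne r (List.mem_cons_of_mem _ hr))⟩
        intro r hr
        rcases (mem_pvInsLex p r qs).mp hr with rfl | hr
        · exact pvLexLt_of_le_ne q r hle (hne q (List.mem_cons_self) )
        · exact hq r hr
      · rename_i hle
        have hpq : pvLexLt p q := pvLexLe_of_not q p (by simpa using hle)
        refine List.pairwise_cons.mpr ⟨?_, hl⟩
        intro r hr
        rcases List.mem_cons.mp hr with rfl | hr
        · exact hpq
        · exact pvLexLt_trans hpq (hq r hr)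

-- keep-first running minimum: characterization of the fold behind min?
theorem pvFoldMin_split {κ : Type} [LinearOrder κ] (key : Int → κ) (xs : List Int) (m0 : Int) :
    (xs.foldl (fun a x => if key x < key a then x else a) m0 = m0 ∧ ∀ y ∈ xs, key m0 ≤ key y) ∨
    (∃ l1 l2, key (xs.foldl (fun a x => if key x < key a then x else a) m0) < key m0 ∧
      xs = l1 ++ (xs.foldl (fun a x => if key x < key a then x else a) m0) :: l2 ∧
      (∀ y ∈ l1, key (xs.foldl (fun a x => if key x < key a then x else a) m0) < key y) ∧
      (∀ y ∈ l2, key (xs.foldl (fun a x => if key x < key a then x else a) m0) ≤ key y)) := by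
  induction xs generalizing m0 with
  | nil => left; simp
  | cons x t ih =>
      by_cases hx : key x < key m0
      · simp only [List.foldl_cons, if_pos hx]
        rcases ih x with ⟨heq, hall⟩ | ⟨l1, l2, hlt, hsplit, h1, h2⟩
        · right
          rw [heq]
          exact ⟨[], t, hx, rfl, by simp, hall⟩
        · right
          refine ⟨x :: l1, l2, lt_trans hlt hx, by rw [List.cons_append, ← hsplit], ?_, h2⟩
          intro y hy
          rcases List.mem_cons.mp hy with rfl | hy
          · exact hlt
          · exact h1 y hy
      · rw [not_lt] at hx
        simp only [List.foldl_cons, if_neg (not_lt.mpr hx)]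
        rcases ih m0 with ⟨heq, hall⟩ | ⟨l1, l2, hlt, hsplit, h1, h2⟩
        · left
          refine ⟨heq, ?_⟩
          intro y hy
          rcases List.mem_cons.mp hy with rfl | hy
          · exact hx
          · exact hall y hy
        · right
          refine ⟨x :: l1, l2, hlt, by rw [List.cons_append, ← hsplit], ?_, h2⟩
          intro y hy
          rcases List.mem_cons.mp hy with rfl | hy
          · exact lt_of_lt_of_le hlt hx
          · exact h1 y hy

theorem min?_eq_foldl {κ : Type} [LinearOrder κ] (key : Int → κ) (x : Int) (t : List Int) :
    PySem.List.min? (x :: t) key = some (t.foldl (fun a y => if key y < key a then y else a) x) := by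
  unfold PySem.List.min?
  simp only [List.foldl_cons]
  induction t generalizing x with
  | nil => rfl
  | cons y t ih =>
      simp only [List.foldl_cons]
      by_cases h : key y < key x <;> simp [h, ih]
-- A's chosen index: 0 ≤ r < n, r minimizes the key, and is the FIRST minimizer
theorem pvAspec (n : Int) (hn : 1 ≤ n) (key : Int → Int) (r : Int)
    (h : (PySem.List.min? (PySem.List.pyRange 0 n 1) key).getD 0 = r) :
    0 ≤ r ∧ r < n ∧ (∀ j, 0 ≤ j → j < n → key r ≤ key j) ∧ (∀ j, 0 ≤ j → j < r → key r < key j) := by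
  have hcons : PySem.List.pyRange 0 n 1 = 0 :: PySem.List.pyRange 1 n 1 :=
    PySem.List.pyRange_one_cons (by omega)
  rw [hcons, min?_eq_foldl key 0 (PySem.List.pyRange 1 n 1)] at h
  simp only [Option.getD_some] at h
  have hpw := PySem.List.pairwise_lt_pyRange_one 1 n
  rcases pvFoldMin_split key (PySem.List.pyRange 1 n 1) 0 with ⟨heq, hall⟩ | ⟨l1, l2, hlt, hsplit, h1, h2⟩
  · rw [heq] at h
    subst h
    refine ⟨le_refl 0, by omega, ?_, by omega⟩
    intro j hj0 hjn
    rcases eq_or_lt_of_le hj0 with rfl | hj1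
    · exact le_refl _
    · exact hall j (PySem.List.mem_pyRange_one.mpr ⟨by omega, hjn⟩)
  · rw [h] at hlt hsplit h1 h2
    have hrmem : r ∈ PySem.List.pyRange 1 n 1 := by
      rw [hsplit]; exact List.mem_append.mpr (Or.inr (List.mem_cons_self))
    have hrrange := PySem.List.mem_pyRange_one.mp hrmem
    have hl2 : ∀ y ∈ l2, r < y := by
      rw [hsplit] at hpw
      have := (List.pairwise_append.mp hpw).2.1
      exact fun y hy => (List.pairwise_cons.mp this).1 y hy
    refine ⟨by omega, hrrange.2, ?_, ?_⟩
    · intro j hj0 hjn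
      rcases eq_or_lt_of_le hj0 with rfl | hj1
      · exact le_of_lt hlt
      · have hjmem : j ∈ PySem.List.pyRange 1 n 1 := PySem.List.mem_pyRange_one.mpr ⟨by omega, hjn⟩
        rw [hsplit] at hjmem
        rcases List.mem_append.mp hjmem with hj | hj
        · exact le_of_lt (h1 j hj)
        · rcases List.mem_cons.mp hj with rfl | hj
          · exact le_refl _
          · exact h2 j hj
    · intro j hj0 hjr
      rcases eq_or_lt_of_le hj0 with rfl | hj1
      · exact hlt
      · have hjmem : j ∈ PySem.List.pyRange 1 n 1 := PySem.List.mem_pyRange_one.mpr ⟨by omega, by omega⟩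
        rw [hsplit] at hjmem
        rcases List.mem_append.mp hjmem with hj | hj
        · exact h1 j hj
        · rcases List.mem_cons.mp hj with rfl | hj
          · omega
          · exact absurd (hl2 j hj) (by omega)

-- second components of the machine pool are strictly increasing (hence nodup)
theorem pvMach_pairwise_snd (l : List Int) (off : Int) :
    (pvMach l off).Pairwise (fun p q => p.2 < q.2) := by
  induction l generalizing off with
  | nil => exact List.Pairwise.nil
  | cons x l ih =>
      refine List.pairwise_cons.mpr ⟨?_, ih (off + 1)⟩
      intro q hq
      rcases (mem_pvMach l (off + 1) q).mp hq with ⟨k, hk, rfl⟩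
      simp; omega

theorem pvMach_snd_nodup (l : List Int) (off : Int) :
    ((pvMach l off).map Prod.snd).Nodup := by
  have := pvMach_pairwise_snd l off
  rw [List.nodup_iff_pairwise_ne]
  exact (List.pairwise_map).mpr (this.imp (fun h => by omega))

-- B's head: the front of the sorted pool is the first least-loaded machine
theorem pvBspec (tempos : List Int) (maq : List (Int × Int)) (carga idx : Int)
    (rest : List (Int × Int))
    (hp : maq.Perm (pvMach tempos 0)) (hpw : maq.Pairwise pvLexLt)
    (hm : maq = (carga, idx) :: rest) :
    0 ≤ idx ∧ idx < (tempos.length : Int) ∧ PySem.List.pyGetD tempos idx 0 = carga ∧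
    (∀ j, 0 ≤ j → j < (tempos.length : Int) →
        PySem.List.pyGetD tempos idx 0 ≤ PySem.List.pyGetD tempos j 0) ∧
    (∀ j, 0 ≤ j → j < idx → PySem.List.pyGetD tempos idx 0 < PySem.List.pyGetD tempos j 0) ∧
    (∀ q ∈ rest, q.2 ≠ idx) := by
  subst hm
  have hhead : (carga, idx) ∈ pvMach tempos 0 := hp.mem_iff.mp (List.mem_cons_self)
  rcases (mem_pvMach tempos 0 _).mp hhead with ⟨k, hk, hkeq⟩
  have hidx : idx = (k : Int) := by simpa using congrArg Prod.snd hkeq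
  have hcarga : carga = tempos[k] := by simpa using congrArg Prod.fst hkeq
  have hget : PySem.List.pyGetD tempos idx 0 = carga := by
    rw [PySem.List.pyGetD_eq_getElem tempos 0 (by omega) (by omega), hcarga]
    congr 1; omega
  have hnd : (((carga, idx) :: rest).map Prod.snd).Nodup :=
    (hp.map Prod.snd).nodup_iff.mpr (pvMach_snd_nodup tempos 0)
  have hrestne : ∀ q ∈ rest, q.2 ≠ idx := by
    intro q hq hqe
    have hnd' : (idx :: rest.map Prod.snd).Nodup := by simpa using hnd
    exact (List.nodup_cons.mp hnd').1 (hqe ▸ List.mem_map_of_mem hq)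
  have hlt : ∀ j, 0 ≤ j → j < (tempos.length : Int) → j ≠ idx →
      carga < PySem.List.pyGetD tempos j 0 ∨
        (carga = PySem.List.pyGetD tempos j 0 ∧ idx < j) := by
    intro j hj0 hjn hjne
    have hjk : j.toNat < tempos.length := by omega
    have hjmem : (PySem.List.pyGetD tempos j 0, j) ∈ pvMach tempos 0 := by
      rw [mem_pvMach]
      refine ⟨j.toNat, hjk, ?_⟩
      rw [PySem.List.pyGetD_eq_getElem tempos 0 hj0 hjn]
      have : ((0:Int) + (j.toNat : Int)) = j := by omega
      rw [this]
    have := hp.mem_iff.mpr hjmem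
    rcases List.mem_cons.mp this with heq | hmem
    · have hji : j = idx := by simpa using congrArg Prod.snd heq
      exact absurd hji hjne
    · simpa [pvLexLt] using (List.pairwise_cons.mp hpw).1 _ hmem
  refine ⟨by omega, by omega, hget, ?_, ?_, hrestne⟩
  · intro j hj0 hjn
    by_cases hje : j = idx
    · subst hje; exact le_refl _
    · rw [hget]
      rcases hlt j hj0 hjn hje with h | ⟨h, _⟩ <;> omega
  · intro j hj0 hjr
    rw [hget]
    rcases hlt j hj0 (by omega) (by omega) with h | ⟨h, h2⟩ <;> omega

-- the two loop bodies, named for the induction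
def pvStepA (num_maquinas : Int) (st : List (List Int) × List Int) (tv : Int × Int) :
    List (List Int) × List Int :=
  let idx : Int := (PySem.List.min? (PySem.List.pyRange 0 num_maquinas 1)
                      (fun i => PySem.List.pyGetD st.2 i 0)).getD 0
  (st.1.set idx.toNat (st.1.getD idx.toNat [] ++ [tv.1]),
   st.2.set idx.toNat (st.2.getD idx.toNat 0 + tv.2))

def pvStepB (st : List (List Int) × List (Int × Int)) (tv : Int × Int) :
    List (List Int) × List (Int × Int) :=
  match st.2 with
  | [] => st
  | (carga, idx) :: rest =>
      (st.1.set idx.toNat (st.1.getD idx.toNat [] ++ [tv.1]),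
       pvInsLex (carga + tv.2, idx) rest)

theorem pvLoop_eq (m : Int) (hm : 1 ≤ m) (ts : List (Int × Int)) :
    ∀ (sol : List (List Int)) (tempos : List Int) (maq : List (Int × Int)),
    tempos.length = m.toNat → maq.Perm (pvMach tempos 0) → maq.Pairwise pvLexLt →
    (ts.foldl (pvStepA m) (sol, tempos)).1 = (ts.foldl pvStepB (sol, maq)).1 := by
  induction ts with
  | nil => intro sol tempos maq _ _ _; rfl
  | cons tv ts ih =>
      intro sol tempos maq hlen hp hpw
      have hmaqlen : maq.length = tempos.length := hp.length_eq.trans (pvMach_length tempos 0)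
      rcases maq with _ | ⟨⟨carga, idx⟩, rest⟩
      · simp at hmaqlen; omega
      rcases pvBspec tempos _ carga idx rest hp hpw rfl with
        ⟨hidx0, hidxn, hget, hmin, hfirst, hrestne⟩
      have hlenm : (tempos.length : Int) = m := by omega
      rw [hlenm] at hidxn hmin
      have hA := pvAspec m hm (fun i => PySem.List.pyGetD tempos i 0) _ rfl
      rcases hA with ⟨hr0, hrn, hrmin, hrfirst⟩
      set r : Int := (PySem.List.min? (PySem.List.pyRange 0 m 1)
                        (fun i => PySem.List.pyGetD tempos i 0)).getD 0 with hrdef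
      -- the two selections agree
      have hri : r = idx := by
        rcases lt_trichotomy r idx with hc | hc | hc
        · have h1 := hfirst r hr0 hc
          have h2 := hrmin idx hidx0 hidxn
          simp only at h1 h2; omega
        · exact hc
        · have h1 := hrfirst idx hidx0 hc
          have h2 := hmin r hr0 hrn
          simp only at h1 h2; omega
      -- step the two states
      simp only [List.foldl_cons]
      have hstepA : pvStepA m (sol, tempos) tv =
          (sol.set idx.toNat (sol.getD idx.toNat [] ++ [tv.1]),
           tempos.set idx.toNat (carga + tv.2)) := by
        show (sol.set r.toNat (sol.getD r.toNat [] ++ [tv.1]),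
              tempos.set r.toNat (tempos.getD r.toNat 0 + tv.2)) = _
        rw [hri]
        have : tempos.getD idx.toNat 0 = carga := by
          rw [← hget, PySem.List.pyGetD_of_nonneg tempos 0 hidx0]
        rw [this]
      have hstepB : pvStepB (sol, (carga, idx) :: rest) tv =
          (sol.set idx.toNat (sol.getD idx.toNat [] ++ [tv.1]),
           pvInsLex (carga + tv.2, idx) rest) := rfl
      rw [hstepA, hstepB]
      -- re-establish the invariant
      have hk : idx.toNat < tempos.length := by omega
      have hcast : (0 : Int) + (idx.toNat : Int) = idx := by omega
      have hgetk : tempos[idx.toNat] = carga := by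
        rw [← hget, PySem.List.pyGetD_eq_getElem tempos 0 hidx0 (by omega)]
      have hperm' : (pvInsLex (carga + tv.2, idx) rest).Perm
          (pvMach (tempos.set idx.toNat (carga + tv.2)) 0) := by
        have hsp := pvMach_set_perm tempos idx.toNat (carga + tv.2) 0 hk
        rw [hcast, hgetk] at hsp
        have hrest : rest.Perm ((pvMach tempos 0).erase (carga, idx)) :=
          (List.cons_perm_iff_perm_erase.mp hp).2
        exact ((pvInsLex_perm _ rest).trans (hrest.cons _)).trans hsp.symm
      have hpw' : (pvInsLex (carga + tv.2, idx) rest).Pairwise pvLexLt :=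
        pvInsLex_pairwise _ rest (List.pairwise_cons.mp hpw).2 hrestne
      exact ih _ _ _ (by simpa using hlen) hperm' hpw'

theorem pvInitPool (k : Nat) (off : Int) :
    (PySem.List.pyRange off (off + k) 1).map (fun i => ((0 : Int), i)) =
      pvMach (List.replicate k 0) off := by
  induction k generalizing off with
  | zero =>
      rw [show (off + ((0:Nat):Int)) = off by push_cast; ring,
          PySem.List.pyRange_one_eq_nil (le_refl off)]
      rfl
  | succ k ihk =>
      rw [PySem.List.pyRange_one_cons (by push_cast; omega)]
      have h1 : off + ((k : Int) + 1) = (off + 1) + k := by ring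
      simp only [List.replicate_succ, pvMach, List.map_cons]
      push_cast
      rw [h1, ihk (off + 1)]

theorem pvInitPairwise (k : Nat) (off : Int) :
    (pvMach (List.replicate k 0) off).Pairwise pvLexLt := by
  induction k generalizing off with
  | zero => exact List.Pairwise.nil
  | succ k ihk =>
      simp only [List.replicate_succ, pvMach]
      refine List.pairwise_cons.mpr ⟨?_, ihk (off + 1)⟩
      intro q hq
      rcases (mem_pvMach _ _ q).mp hq with ⟨j, hj, rfl⟩
      right
      refine ⟨by simp, by omega⟩

-- ===== VERDICT (by name: the statement is the Claim_ definition above) =====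
theorem gerar_solucao_inicial_spt_spec : Claim_equal_gerar_solucao_inicial_spt := by
  intro tt m _ hpre
  unfold Spec_gerar_solucao_inicial_spt gerar_solucao_inicial_spt gerar_solucao_inicial_spt_alt
  rcases hpre with hm | rfl
  · have h0 : ((0:Int) + (m.toNat : Int)) = m := by omega
    have hpool := pvInitPool m.toNat 0
    rw [h0] at hpool
    have hmain := pvLoop_eq m hm
      (PySem.List.sorted (PySem.Dict.ofList tt).items (fun item => item.2))
      ((PySem.List.pyRange 0 m 1).map (fun _ => []))
      (List.replicate m.toNat 0)
      ((PySem.List.pyRange 0 m 1).map (fun i => (0, i)))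
      (by simp)
      (by rw [hpool])
      (by rw [hpool]; exact pvInitPairwise m.toNat 0)
    exact hmain
  · rfl
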